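-- pv_equiv track=rewrite | github.com/mbaljko/vault-grading-pipeline | 01_units/pipelines/pl1C_rubric_devt/python/layer1_indicator_scoring_runtime.py | has_windowed_group_alignment
-- ===== SOURCE A (Python) =====
-- def has_windowed_group_alignment(group_spans: dict[str, list[tuple[int, int]]], window_size: int) -> bool:
-- 	groups = [group_name for group_name, spans in group_spans.items() if spans]
-- 	if not groups:
-- 		return False
--
-- 	def dfs(group_index: int, current_min: int, current_max: int) -> bool:
-- 		if group_index >= len(groups):
-- 			return (current_max - current_min) <= window_size
-- 		for start, end in group_spans[groups[group_index]]:
-- 			next_min = min(current_min, start)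
-- 			next_max = max(current_max, end)
-- 			if (next_max - next_min) > window_size:
-- 				continue
-- 			if dfs(group_index + 1, next_min, next_max):
-- 				return True
-- 		return False
--
-- 	for start, end in group_spans[groups[0]]:
-- 		if dfs(1, start, end):
-- 			return True
-- 	return False
-- ===== SOURCE B (Python) =====
-- def has_windowed_group_alignment(group_spans: dict[str, list[tuple[int, int]]], window_size: int) -> bool:
-- 	groups = [spans for spans in group_spans.values() if spans]
-- 	starts = sorted({start for spans in groups for start, _ in spans})
-- 	return any(
-- 		all(
-- 			any(start >= left and end <= left + window_size for start, end in spans)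
-- 			for spans in groups
-- 		)
-- 		for left in starts
-- 	)
-- ===== Notes on version B (the rewrite author's own statement) =====
-- stated objective: faster
-- what changed: Replaces A's depth-first search over all per-group span combinations by a sweep over the distinct candidate left boundaries (span starts), checking for each boundary that every group has one span fitting in [left, left+window]; equivalence holds because any feasible combination is witnessed by its minimal chosen start.
import Mathlib
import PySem

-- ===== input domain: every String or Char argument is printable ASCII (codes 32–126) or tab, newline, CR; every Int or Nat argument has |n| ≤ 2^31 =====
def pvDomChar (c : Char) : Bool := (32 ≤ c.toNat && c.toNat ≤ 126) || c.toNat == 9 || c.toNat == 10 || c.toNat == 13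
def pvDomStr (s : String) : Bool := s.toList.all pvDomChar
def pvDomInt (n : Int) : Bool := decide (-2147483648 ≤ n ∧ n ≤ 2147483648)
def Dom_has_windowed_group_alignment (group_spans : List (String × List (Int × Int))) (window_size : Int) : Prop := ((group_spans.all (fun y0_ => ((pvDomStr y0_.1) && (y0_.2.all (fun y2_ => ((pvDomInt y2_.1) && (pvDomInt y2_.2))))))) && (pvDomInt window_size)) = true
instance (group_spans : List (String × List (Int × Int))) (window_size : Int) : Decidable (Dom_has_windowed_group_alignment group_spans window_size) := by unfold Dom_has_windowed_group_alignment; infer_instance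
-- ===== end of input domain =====

-- B replaces A's exponential per-group DFS over span combinations by a sweep over the
-- distinct candidate left boundaries (span starts), checking each group for one fitting span.

-- ===== PORT A =====
-- group_spans[name]: first-match lookup on the association list (Python dict lookup);
-- the default [] is never reached, since A only looks up names taken from the dict itself.
def pvLookupA (group_spans : List (String × List (Int × Int))) (name : String) : List (Int × Int) :=
  ((PySem.Dict.mk group_spans).get? name).getD []

-- the inner 'def dfs': recursion on the remaining group names (group_index .. end)
def pvDfsA (group_spans : List (String × List (Int × Int))) (window_size : Int) :
    List String → Int → Int → Bool
  | [], current_min, current_max => decide (current_max - current_min ≤ window_size)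
  | name :: rest, current_min, current_max =>
      (pvLookupA group_spans name).any (fun se =>
        let next_min := min current_min se.1
        let next_max := max current_max se.2
        if next_max - next_min > window_size then false
        else pvDfsA group_spans window_size rest next_min next_max)

def has_windowed_group_alignment (group_spans : List (String × List (Int × Int))) (window_size : Int) : Bool :=
  let groups := (group_spans.filter (fun p => !p.2.isEmpty)).map Prod.fst
  match groups with
  | [] => false
  | g0 :: rest =>
      (pvLookupA group_spans g0).any (fun se => pvDfsA group_spans window_size rest se.1 se.2)

-- ===== PORT B =====
def has_windowed_group_alignment_alt (group_spans : List (String × List (Int × Int))) (window_size : Int) : Bool :=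
  let groups := (group_spans.map Prod.snd).filter (fun spans => !spans.isEmpty)
  let starts := PySem.List.sorted
    (PySem.Set.ofList (groups.flatMap (fun spans => spans.map Prod.fst))) (fun x => x) false
  starts.any (fun left => groups.all (fun spans =>
    spans.any (fun se => decide (left ≤ se.1) && decide (se.2 ≤ left + window_size))))

-- ===== PRECONDITION & SPEC =====
-- Pre_ excludes association lists with duplicate keys: a Python dict cannot contain them
-- (dict construction collapses duplicates), so such lists do not faithfully encode any
-- dict input of A, and the first-match assoc-list reading diverges from it.
def Pre_has_windowed_group_alignment (group_spans : List (String × List (Int × Int))) (window_size : Int) : Prop :=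
  (group_spans.map Prod.fst).Nodup
instance (group_spans : List (String × List (Int × Int))) (window_size : Int) : Decidable (Pre_has_windowed_group_alignment group_spans window_size) := by unfold Pre_has_windowed_group_alignment; infer_instance

def pvWitness_has_windowed_group_alignment : (List (String × List (Int × Int))) × Int :=
  ([("a", [(0, 3), (5, 6)]), ("b", [(4, 6)])], 6)

def Spec_has_windowed_group_alignment (group_spans : List (String × List (Int × Int))) (window_size : Int) (out : Bool) : Prop := out = has_windowed_group_alignment_alt group_spans window_size
instance (group_spans : List (String × List (Int × Int))) (window_size : Int) (out : Bool) : Decidable (Spec_has_windowed_group_alignment group_spans window_size out) := by unfold Spec_has_windowed_group_alignment; infer_instance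

-- ===== CLAIM (what is proved, stated in full; the proofs are below) =====
def Claim_equal_has_windowed_group_alignment : Prop := ∀ (group_spans : List (String × List (Int × Int))) (window_size : Int), Dom_has_windowed_group_alignment group_spans window_size → Pre_has_windowed_group_alignment group_spans window_size → Spec_has_windowed_group_alignment group_spans window_size (has_windowed_group_alignment group_spans window_size)

-- ===== LEMMAS AND PROOFS =====

-- max of the chosen ends / min of the chosen starts, seeded with the accumulator
def pvFmax (mx : Int) (ps : List (Int × Int)) : Int := ps.foldr (fun q m => max q.2 m) mx
def pvFmin (mn : Int) (ps : List (Int × Int)) : Int := ps.foldr (fun q m => min q.1 m) mn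

lemma pvFmax_ge (mx : Int) (ps : List (Int × Int)) : mx ≤ pvFmax mx ps := by
  induction ps with
  | nil => simp [pvFmax]
  | cons q t ih => exact le_trans ih (le_max_right _ _)

lemma pvFmin_le (mn : Int) (ps : List (Int × Int)) : pvFmin mn ps ≤ mn := by
  induction ps with
  | nil => simp [pvFmin]
  | cons q t ih => exact le_trans (min_le_right _ _) ih

lemma pvFmax_mem (mx : Int) {ps : List (Int × Int)} {q : Int × Int} (h : q ∈ ps) :
    q.2 ≤ pvFmax mx ps := by
  induction ps with
  | nil => cases h
  | cons r t ih =>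
      rcases List.mem_cons.mp h with rfl | h
      · exact le_max_left _ _
      · exact le_trans (ih h) (le_max_right _ _)

lemma pvFmin_mem (mn : Int) {ps : List (Int × Int)} {q : Int × Int} (h : q ∈ ps) :
    pvFmin mn ps ≤ q.1 := by
  induction ps with
  | nil => cases h
  | cons r t ih =>
      rcases List.mem_cons.mp h with rfl | h
      · exact min_le_left _ _
      · exact le_trans (min_le_right _ _) (ih h)

lemma pvFmax_pull (e mx : Int) (ps : List (Int × Int)) :
    pvFmax (max mx e) ps = max e (pvFmax mx ps) := by
  induction ps with
  | nil => simp [pvFmax, max_comm]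
  | cons q t ih => simp only [pvFmax, List.foldr_cons] at *; rw [ih, max_left_comm]

lemma pvFmin_pull (s mn : Int) (ps : List (Int × Int)) :
    pvFmin (min mn s) ps = min s (pvFmin mn ps) := by
  induction ps with
  | nil => simp [pvFmin, min_comm]
  | cons q t ih => simp only [pvFmin, List.foldr_cons] at *; rw [ih, min_left_comm]

lemma pvFmax_cons (mx : Int) (se : Int × Int) (ps : List (Int × Int)) :
    pvFmax mx (se :: ps) = pvFmax (max mx se.2) ps := by
  rw [pvFmax_pull]; rfl

lemma pvFmin_cons (mn : Int) (se : Int × Int) (ps : List (Int × Int)) :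
    pvFmin mn (se :: ps) = pvFmin (min mn se.1) ps := by
  rw [pvFmin_pull]; rfl

lemma pvFmin_cases (mn : Int) (ps : List (Int × Int)) :
    pvFmin mn ps = mn ∨ ∃ q ∈ ps, pvFmin mn ps = q.1 := by
  induction ps with
  | nil => exact Or.inl rfl
  | cons q t ih =>
      simp only [pvFmin, List.foldr_cons] at *
      rcases min_cases q.1 (pvFmin mn t) with ⟨h, _⟩ | ⟨h, _⟩
      · exact Or.inr ⟨q, List.mem_cons_self .., by simpa [pvFmin] using h⟩
      · rcases ih with h' | ⟨r, hr, h'⟩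
        · exact Or.inl (by simp [pvFmin] at h ⊢; omega)
        · exact Or.inr ⟨r, List.mem_cons_of_mem _ hr, by simp [pvFmin] at h ⊢; omega⟩

lemma pvLe_fmin {L mn : Int} {ps : List (Int × Int)} (h0 : L ≤ mn)
    (h : ∀ q ∈ ps, L ≤ q.1) : L ≤ pvFmin mn ps := by
  induction ps with
  | nil => exact h0
  | cons q t ih =>
      simp only [pvFmin, List.foldr_cons]
      exact le_min (h q (List.mem_cons_self ..)) (ih (fun r hr => h r (List.mem_cons_of_mem _ hr)))

lemma pvFmax_le {L mx : Int} {ps : List (Int × Int)} (h0 : mx ≤ L)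
    (h : ∀ q ∈ ps, q.2 ≤ L) : pvFmax mx ps ≤ L := by
  induction ps with
  | nil => exact h0
  | cons q t ih =>
      simp only [pvFmax, List.foldr_cons]
      exact max_le (h q (List.mem_cons_self ..)) (ih (fun r hr => h r (List.mem_cons_of_mem _ hr)))

-- first-match lookup finds the entry itself when keys are unique
lemma pvLookupA_eq (l : List (String × List (Int × Int))) (hn : (l.map Prod.fst).Nodup)
    {p : String × List (Int × Int)} (hp : p ∈ l) : pvLookupA l p.1 = p.2 := by
  induction l with
  | nil => cases hp
  | cons q t ih =>
      obtain ⟨k, v⟩ := q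
      simp only [List.map_cons, List.nodup_cons] at hn
      rcases List.mem_cons.mp hp with rfl | hp'
      · simp [pvLookupA, PySem.Dict.get?_mk_cons]
      · have hne : k ≠ p.1 := fun h => hn.1 (h ▸ List.mem_map_of_mem hp')
        have hrec := ih hn.2 hp'
        simp only [pvLookupA, PySem.Dict.get?_mk_cons] at hrec ⊢
        simpa [beq_iff_eq, hne] using hrec

-- A's dfs returns true iff one span can be chosen from each remaining group so that
-- the overall span range (including the accumulator) fits in the window
lemma pvDfsA_iff (l : List (String × List (Int × Int))) (w : Int)
    (names : List String) (gs : List (List (Int × Int)))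
    (h : List.Forall₂ (fun n g => pvLookupA l n = g) names gs) :
    ∀ mn mx, (pvDfsA l w names mn mx = true ↔
      ∃ ps, List.Forall₂ (· ∈ ·) ps gs ∧ pvFmax mx ps - pvFmin mn ps ≤ w) := by
  induction h with
  | nil =>
      intro mn mx
      simp [pvDfsA, List.forall₂_nil_right_iff, pvFmax, pvFmin]
  | @cons n g names gs hng _ ih =>
      intro mn mx
      rw [pvDfsA]
      simp only [List.any_eq_true, hng]
      constructor
      · rintro ⟨se, hse, hval⟩
        by_cases hfit : max mx se.2 - min mn se.1 > w
        · simp [hfit] at hval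
        · simp only [hfit, if_false] at hval
          rcases (ih _ _).mp hval with ⟨ps, hps, hcond⟩
          refine ⟨se :: ps, List.Forall₂.cons hse hps, ?_⟩
          rw [pvFmax_cons, pvFmin_cons]
          exact hcond
      · rintro ⟨ps, hps, hcond⟩
        rcases List.forall₂_cons_right_iff.mp hps with ⟨se, ps', hse, hps', rfl⟩
        refine ⟨se, hse, ?_⟩
        have hcond' : pvFmax (max mx se.2) ps' - pvFmin (min mn se.1) ps' ≤ w := by
          rw [pvFmax_cons, pvFmin_cons] at hcond
          exact hcond
        have hfit : ¬ (max mx se.2 - min mn se.1 > w) := by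
          have h1 := pvFmax_ge (max mx se.2) ps'
          have h2 := pvFmin_le (min mn se.1) ps'
          omega
        simp only [hfit, if_false]
        exact (ih _ _).mpr ⟨ps', hps', hcond'⟩

-- positional choices: extract the pick belonging to a given group
lemma pvForall₂_pick {ps : List (Int × Int)} {gs : List (List (Int × Int))}
    (h : List.Forall₂ (· ∈ ·) ps gs) {g : List (Int × Int)} (hg : g ∈ gs) :
    ∃ q ∈ ps, q ∈ g := by
  induction h with
  | nil => cases hg
  | cons hq _ ih =>
      rcases List.mem_cons.mp hg with rfl | hg
      · exact ⟨_, List.mem_cons_self .., hq⟩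
      · rcases ih hg with ⟨q, hq1, hq2⟩
        exact ⟨q, List.mem_cons_of_mem _ hq1, hq2⟩

-- every pick lies in some group
lemma pvForall₂_src {ps : List (Int × Int)} {gs : List (List (Int × Int))}
    (h : List.Forall₂ (· ∈ ·) ps gs) {q : Int × Int} (hq : q ∈ ps) :
    ∃ g ∈ gs, q ∈ g := by
  induction h with
  | nil => cases hq
  | cons hq' _ ih =>
      rcases List.mem_cons.mp hq with rfl | hq
      · exact ⟨_, List.mem_cons_self .., hq'⟩
      · rcases ih hq with ⟨g, hg1, hg2⟩
        exact ⟨g, List.mem_cons_of_mem _ hg1, hg2⟩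

-- choose one fitting span from each group
lemma pvPickAll {w L : Int} {gs : List (List (Int × Int))}
    (h : ∀ g ∈ gs, ∃ se ∈ g, L ≤ se.1 ∧ se.2 ≤ L + w) :
    ∃ ps, List.Forall₂ (· ∈ ·) ps gs ∧ ∀ q ∈ ps, L ≤ q.1 ∧ q.2 ≤ L + w := by
  induction gs with
  | nil => exact ⟨[], List.Forall₂.nil, by simp⟩
  | cons g t ih =>
      rcases h g (List.mem_cons_self ..) with ⟨se, hse, hb⟩
      rcases ih (fun g' hg' => h g' (List.mem_cons_of_mem _ hg')) with ⟨ps, hps, hall⟩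
      refine ⟨se :: ps, List.Forall₂.cons hse hps, ?_⟩
      intro q hq
      rcases List.mem_cons.mp hq with rfl | hq
      · exact hb
      · exact hall q hq

-- the mathematical core: a per-group choice fitting the window exists iff some span
-- start serves as a common left boundary
lemma pvCore (w : Int) (gs : List (List (Int × Int))) :
    (∃ p ps, List.Forall₂ (· ∈ ·) (p :: ps) gs ∧ pvFmax p.2 ps - pvFmin p.1 ps ≤ w) ↔
    (∃ L, (∃ g ∈ gs, ∃ se ∈ g, se.1 = L) ∧
      ∀ g ∈ gs, ∃ se ∈ g, L ≤ se.1 ∧ se.2 ≤ L + w) := by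
  constructor
  · rintro ⟨p, ps, hps, hcond⟩
    rcases List.forall₂_cons_left_iff.mp hps with ⟨g0, rest, hp0, htail, rfl⟩
    refine ⟨pvFmin p.1 ps, ?_, ?_⟩
    · rcases pvFmin_cases p.1 ps with h | ⟨q, hq, h⟩
      · exact ⟨g0, List.mem_cons_self .., p, hp0, h.symm⟩
      · rcases pvForall₂_src htail hq with ⟨g, hg, hqg⟩
        exact ⟨g, List.mem_cons_of_mem _ hg, q, hqg, h.symm⟩
    · intro g hg
      rcases pvForall₂_pick hps hg with ⟨q, hq, hqg⟩
      refine ⟨q, hqg, ?_, ?_⟩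
      · rcases List.mem_cons.mp hq with rfl | hq
        · exact pvFmin_le _ _
        · exact pvFmin_mem _ hq
      · have h2 : q.2 ≤ pvFmax p.2 ps := by
          rcases List.mem_cons.mp hq with rfl | hq
          · exact pvFmax_ge _ _
          · exact pvFmax_mem _ hq
        omega
  · rintro ⟨L, ⟨g, hg, se, hse, rfl⟩, hall⟩
    rcases pvPickAll hall with ⟨ps, hps, hbnd⟩
    cases gs with
    | nil => cases hg
    | cons g0 rest =>
        rcases List.forall₂_cons_right_iff.mp hps with ⟨p, ps', hp, hps', rfl⟩
        refine ⟨p, ps', hps, ?_⟩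
        have h1 : pvFmax p.2 ps' ≤ se.1 + w :=
          pvFmax_le (hbnd p (List.mem_cons_self ..)).2
            (fun q hq => (hbnd q (List.mem_cons_of_mem _ hq)).2)
        have h2 : se.1 ≤ pvFmin p.1 ps' :=
          pvLe_fmin (hbnd p (List.mem_cons_self ..)).1
            (fun q hq => (hbnd q (List.mem_cons_of_mem _ hq)).1)
        omega

-- the nonempty span lists, in dict order (shared shape of both ports)
def pvSpans (l : List (String × List (Int × Int))) : List (List (Int × Int)) :=
  (l.filter (fun p => !p.2.isEmpty)).map Prod.snd

lemma pvNamesSpans (l fl : List (String × List (Int × Int)))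
    (hn : (l.map Prod.fst).Nodup) (hsub : ∀ p ∈ fl, p ∈ l) :
    List.Forall₂ (fun n g => pvLookupA l n = g) (fl.map Prod.fst) (fl.map Prod.snd) := by
  induction fl with
  | nil => exact List.Forall₂.nil
  | cons p t ih =>
      exact List.Forall₂.cons (pvLookupA_eq l hn (hsub p (List.mem_cons_self ..)))
        (ih (fun q hq => hsub q (List.mem_cons_of_mem _ hq)))

lemma pvA_iff (l : List (String × List (Int × Int))) (w : Int)
    (hn : (l.map Prod.fst).Nodup) :
    (has_windowed_group_alignment l w = true ↔
      ∃ p ps, List.Forall₂ (· ∈ ·) (p :: ps) (pvSpans l) ∧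
        pvFmax p.2 ps - pvFmin p.1 ps ≤ w) := by
  unfold has_windowed_group_alignment pvSpans
  have hsub : ∀ p ∈ l.filter (fun p => !p.2.isEmpty), p ∈ l := fun p hp => List.mem_of_mem_filter hp
  cases hfl : l.filter (fun p => !p.2.isEmpty) with
  | nil =>
      simp only [List.map_nil]
      constructor
      · intro h; cases h
      · rintro ⟨p, ps, hps, -⟩; cases hps
  | cons e tl =>
      rw [hfl] at hsub
      simp only [List.map_cons]
      rw [pvLookupA_eq l hn (hsub e (List.mem_cons_self ..))]
      have htail := pvNamesSpans l tl hn (fun q hq => hsub q (List.mem_cons_of_mem _ hq))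
      simp only [List.any_eq_true]
      constructor
      · rintro ⟨se, hse, hd⟩
        rcases (pvDfsA_iff l w _ _ htail se.1 se.2).mp hd with ⟨ps, hps, hcond⟩
        exact ⟨se, ps, List.Forall₂.cons hse hps, hcond⟩
      · rintro ⟨p, ps, hps, hcond⟩
        rcases List.forall₂_cons_right_iff.mp hps with ⟨p2, ps2, hp2, hps2, heq⟩
        injection heq with h1 h2
        subst h1; subst h2
        exact ⟨p, hp2, (pvDfsA_iff l w _ _ htail p.1 p.2).mpr ⟨ps, hps2, hcond⟩⟩

lemma pvB_iff (l : List (String × List (Int × Int))) (w : Int) :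
    (has_windowed_group_alignment_alt l w = true ↔
      ∃ L, (∃ g ∈ pvSpans l, ∃ se ∈ g, se.1 = L) ∧
        ∀ g ∈ pvSpans l, ∃ se ∈ g, L ≤ se.1 ∧ se.2 ≤ L + w) := by
  unfold has_windowed_group_alignment_alt
  have hgr : (l.map Prod.snd).filter (fun spans => !spans.isEmpty) = pvSpans l := by
    rw [pvSpans, List.filter_map]; rfl
  rw [hgr]
  simp only [List.any_eq_true, List.all_eq_true, PySem.List.mem_sorted, PySem.Set.mem_ofList,
    List.mem_flatMap, List.mem_map, Bool.and_eq_true, decide_eq_true_eq]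

-- ===== VERDICT (by name: the statement is the Claim_ definition above) =====
theorem has_windowed_group_alignment_spec : Claim_equal_has_windowed_group_alignment := by
  intro l w _ hpre
  unfold Spec_has_windowed_group_alignment
  rw [Bool.eq_iff_iff, pvA_iff l w hpre, pvB_iff l w, pvCore w (pvSpans l)]
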